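-- pv_equiv track=rewrite | github.com/codewithzayn/AI-Legal-Reasoning-System | src/services/case_law/trend_analyzer.py | extract_strictness_level
-- ===== SOURCE A (Python) =====
-- STRICTER_KEYWORDS = [
--     "narrow",
--     "restrict",
--     "limit",
--     "exception",
--     "high threshold",
--     "strict",
--     "stringent",
--     "tightened",
--     "tightening",
--     "narrower",
-- ]
--
-- LENIENT_KEYWORDS = [
--     "broad",
--     "expand",
--     "include",
--     "lower threshold",
--     "lenient",
--     "broader",
--     "expansion",
--     "more inclusive",
--     "widened",
--     "loosened",
-- ]
--
-- def extract_strictness_level(text: str) -> int: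
--     """Score ruling strictness: -1=lenient, 0=neutral, 1=strict."""
--     if not text:
--         return 0
--     text_lower = text.lower()
--     strict_count = sum(1 for kw in STRICTER_KEYWORDS if kw in text_lower)
--     lenient_count = sum(1 for kw in LENIENT_KEYWORDS if kw in text_lower)
--
--     if strict_count > lenient_count:
--         return 1
--     if lenient_count > strict_count:
--         return -1
--     return 0
-- ===== SOURCE B (Python) =====
-- STRICTER_KEYWORDS = [
--     "narrow", "restrict", "limit", "exception", "high threshold",
--     "strict", "stringent", "tightened", "tightening", "narrower",
-- ]
--
-- LENIENT_KEYWORDS = [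
--     "broad", "expand", "include", "lower threshold", "lenient",
--     "broader", "expansion", "more inclusive", "widened", "loosened",
-- ]
--
-- def extract_strictness_level(text: str) -> int:
--     """Score ruling strictness: -1=lenient, 0=neutral, 1=strict."""
--     t = text.lower()
--     strict_found = set()
--     lenient_found = set()
--     # single left-to-right scan: at each position, record every keyword starting there
--     for i in range(len(t)):
--         for kw in STRICTER_KEYWORDS:
--             if t.startswith(kw, i):
--                 strict_found.add(kw)
--         for kw in LENIENT_KEYWORDS:
--             if t.startswith(kw, i):
--                 lenient_found.add(kw)
--     if len(strict_found) > len(lenient_found):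
--         return 1
--     if len(lenient_found) > len(strict_found):
--         return -1
--     return 0
-- ===== Notes on version B (the rewrite author's own statement) =====
-- stated objective: alternative
-- what changed: Instead of running one substring search per keyword and comparing two counts, B makes a single position-driven scan of the lowered text, at each index recording the keywords that start there into two sets, and compares the set sizes; correct because a nonempty keyword is a substring iff it starts at some index, and the keyword lists are duplicate-free so set size equals the number of matched keywords.
import Mathlib
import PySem

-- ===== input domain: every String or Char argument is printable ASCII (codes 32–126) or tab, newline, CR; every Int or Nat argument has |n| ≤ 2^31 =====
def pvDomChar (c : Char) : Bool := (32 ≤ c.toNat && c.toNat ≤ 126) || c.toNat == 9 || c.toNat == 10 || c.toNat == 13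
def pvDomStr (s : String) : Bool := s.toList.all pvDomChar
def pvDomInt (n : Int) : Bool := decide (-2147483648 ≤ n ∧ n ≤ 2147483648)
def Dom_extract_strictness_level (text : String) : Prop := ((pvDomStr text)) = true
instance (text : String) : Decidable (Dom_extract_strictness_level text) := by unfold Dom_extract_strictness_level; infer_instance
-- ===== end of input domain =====

-- B replaces the per-keyword substring searches by one position-driven scan of the lowered
-- text that collects the keywords starting at each index into two sets; objective: alternative.

def STRICTER_KEYWORDS : List String :=
  ["narrow", "restrict", "limit", "exception", "high threshold",
   "strict", "stringent", "tightened", "tightening", "narrower"]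

def LENIENT_KEYWORDS : List String :=
  ["broad", "expand", "include", "lower threshold", "lenient",
   "broader", "expansion", "more inclusive", "widened", "loosened"]

-- ===== PORT A =====
def extract_strictness_level (text : String) : Int :=
  if text = "" then 0
  else
    let text_lower := PySem.Str.lower text
    let strict_count : Int :=
      STRICTER_KEYWORDS.foldl (fun acc kw => if PySem.Str.isIn kw text_lower then acc + 1 else acc) 0
    let lenient_count : Int :=
      LENIENT_KEYWORDS.foldl (fun acc kw => if PySem.Str.isIn kw text_lower then acc + 1 else acc) 0
    if strict_count > lenient_count then 1
    else if lenient_count > strict_count then -1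
    else 0

-- ===== PORT B =====
-- t.startswith(kw, i) with 0 ≤ i is exactly the prefix test on t[i:] (PySem.Chars.startswith on drop i).
def extract_strictness_level_alt (text : String) : Int :=
  let t : List Char := (PySem.Str.lower text).toList
  let p : PySem.Set String × PySem.Set String :=
    (List.range t.length).foldl
      (fun acc i =>
        (STRICTER_KEYWORDS.foldl
            (fun s kw => if PySem.Chars.startswith (t.drop i) kw.toList then PySem.Set.add s kw else s) acc.1,
         LENIENT_KEYWORDS.foldl
            (fun s kw => if PySem.Chars.startswith (t.drop i) kw.toList then PySem.Set.add s kw else s) acc.2))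
      (PySem.Set.empty, PySem.Set.empty)
  if p.1.length > p.2.length then 1
  else if p.2.length > p.1.length then -1
  else 0

-- ===== PRECONDITION & SPEC =====
def Spec_extract_strictness_level (text : String) (out : Int) : Prop := out = extract_strictness_level_alt text
instance (text : String) (out : Int) : Decidable (Spec_extract_strictness_level text out) := by unfold Spec_extract_strictness_level; infer_instance

-- ===== CLAIM (what is proved, stated in full; the proofs are below) =====
def Claim_equal_extract_strictness_level : Prop := ∀ (text : String), Dom_extract_strictness_level text → Spec_extract_strictness_level text (extract_strictness_level text)

-- ===== LEMMAS AND PROOFS =====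

-- membership after the inner per-position keyword loop
theorem innerFold_mem (kws : List String) (t : List Char) (i : Nat) (s : PySem.Set String) (kw : String) :
    (kw ∈ kws.foldl (fun s kw => if PySem.Chars.startswith (t.drop i) kw.toList then PySem.Set.add s kw else s) s)
      ↔ kw ∈ s ∨ (kw ∈ kws ∧ PySem.Chars.startswith (t.drop i) kw.toList = true) := by
  induction kws generalizing s with
  | nil => simp
  | cons a as ih =>
    simp only [List.foldl_cons]
    by_cases h : PySem.Chars.startswith (t.drop i) a.toList = true
    · rw [if_pos h, ih]
      simp only [PySem.Set.mem_add, List.mem_cons]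
      constructor
      · rintro ((hs | rfl) | ⟨hm, hw⟩)
        · exact Or.inl hs
        · exact Or.inr ⟨Or.inl rfl, h⟩
        · exact Or.inr ⟨Or.inr hm, hw⟩
      · rintro (hs | ⟨(rfl | hm), hw⟩)
        · exact Or.inl (Or.inl hs)
        · exact Or.inl (Or.inr rfl)
        · exact Or.inr ⟨hm, hw⟩
    · rw [if_neg h, ih]
      simp only [List.mem_cons]
      constructor
      · rintro (hs | ⟨hm, hw⟩)
        · exact Or.inl hs
        · exact Or.inr ⟨Or.inr hm, hw⟩
      · rintro (hs | ⟨(rfl | hm), hw⟩)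
        · exact Or.inl hs
        · exact absurd hw h
        · exact Or.inr ⟨hm, hw⟩

theorem innerFold_nodup (kws : List String) (t : List Char) (i : Nat) (s : PySem.Set String)
    (hs : s.Nodup) :
    (kws.foldl (fun s kw => if PySem.Chars.startswith (t.drop i) kw.toList then PySem.Set.add s kw else s) s).Nodup := by
  induction kws generalizing s with
  | nil => exact hs
  | cons a as ih =>
    simp only [List.foldl_cons]
    split
    · exact ih _ (PySem.Set.nodup_add s a hs)
    · exact ih _ hs

-- membership after the whole position scan
theorem scan_mem (kws : List String) (t : List Char) (n : Nat) (kw : String) :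
    (kw ∈ (List.range n).foldl
        (fun s i => kws.foldl (fun s kw => if PySem.Chars.startswith (t.drop i) kw.toList then PySem.Set.add s kw else s) s)
        PySem.Set.empty)
      ↔ kw ∈ kws ∧ ∃ j < n, PySem.Chars.startswith (t.drop j) kw.toList = true := by
  induction n with
  | zero => simp [PySem.Set.empty]
  | succ m ih =>
    rw [List.range_succ, List.foldl_append, List.foldl_cons, List.foldl_nil, innerFold_mem, ih]
    constructor
    · rintro (⟨hm, j, hj, hw⟩ | ⟨hm, hw⟩)
      · exact ⟨hm, j, Nat.lt_succ_of_lt hj, hw⟩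
      · exact ⟨hm, m, Nat.lt_succ_self m, hw⟩
    · rintro ⟨hm, j, hj, hw⟩
      rcases Nat.lt_succ_iff_lt_or_eq.mp hj with h | rfl
      · exact Or.inl ⟨hm, j, h, hw⟩
      · exact Or.inr ⟨hm, hw⟩

theorem scan_nodup (kws : List String) (t : List Char) (n : Nat) :
    ((List.range n).foldl
        (fun s i => kws.foldl (fun s kw => if PySem.Chars.startswith (t.drop i) kw.toList then PySem.Set.add s kw else s) s)
        PySem.Set.empty).Nodup := by
  induction n with
  | zero => simp [PySem.Set.empty]
  | succ m ih =>
    rw [List.range_succ, List.foldl_append, List.foldl_cons, List.foldl_nil]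
    exact innerFold_nodup _ _ _ _ ih

-- size of the scanned set = number of keywords occurring as substrings
theorem scan_length (kws : List String) (hnd : kws.Nodup)
    (hne : ∀ kw ∈ kws, kw.toList ≠ []) (t : List Char) :
    ((List.range t.length).foldl
        (fun s i => kws.foldl (fun s kw => if PySem.Chars.startswith (t.drop i) kw.toList then PySem.Set.add s kw else s) s)
        PySem.Set.empty).length
      = kws.countP (fun kw => PySem.Chars.isIn kw.toList t) := by
  have hperm :
      ((List.range t.length).foldl
          (fun s i => kws.foldl (fun s kw => if PySem.Chars.startswith (t.drop i) kw.toList then PySem.Set.add s kw else s) s)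
          PySem.Set.empty).Perm (kws.filter (fun kw => PySem.Chars.isIn kw.toList t)) := by
    rw [List.perm_ext_iff_of_nodup (scan_nodup kws t _) (hnd.filter _)]
    intro kw
    rw [scan_mem, List.mem_filter]
    constructor
    · rintro ⟨hm, j, _, hw⟩
      refine ⟨hm, ?_⟩
      rw [← PySem.Chars.exists_prefix_drop_iff_isIn]
      exact ⟨j, (PySem.Chars.startswith_iff _ _).mp hw⟩
    · rintro ⟨hm, hin⟩
      refine ⟨hm, ?_⟩
      obtain ⟨j, hj⟩ := (PySem.Chars.exists_prefix_drop_iff_isIn kw.toList t).mpr hin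
      have hjlt : j < t.length := by
        by_contra hge
        rw [List.drop_eq_nil_of_le (Nat.le_of_not_lt hge)] at hj
        exact hne kw hm (List.prefix_nil.mp hj)
      exact ⟨j, hjlt, (PySem.Chars.startswith_iff _ _).mpr hj⟩
  rw [hperm.length_eq, ← List.countP_eq_length_filter]

-- ===== VERDICT (by name: the statement is the Claim_ definition above) =====
theorem extract_strictness_level_spec : Claim_equal_extract_strictness_level := by
  intro text _
  unfold Spec_extract_strictness_level
  by_cases h : text = ""
  · subst h; decide
  · unfold extract_strictness_level extract_strictness_level_alt
    simp only [h, if_false]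
    rw [PySem.List.foldl_prod_mk
        (f := fun s i => STRICTER_KEYWORDS.foldl
          (fun s kw => if PySem.Chars.startswith (((PySem.Str.lower text).toList).drop i) kw.toList then PySem.Set.add s kw else s) s)
        (g := fun s i => LENIENT_KEYWORDS.foldl
          (fun s kw => if PySem.Chars.startswith (((PySem.Str.lower text).toList).drop i) kw.toList then PySem.Set.add s kw else s) s)]
    rw [PySem.List.foldl_if_add_one, PySem.List.foldl_if_add_one]
    rw [scan_length STRICTER_KEYWORDS (by decide) (by decide) _,
        scan_length LENIENT_KEYWORDS (by decide) (by decide) _]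
    have hs : STRICTER_KEYWORDS.countP (fun kw => PySem.Str.isIn kw (PySem.Str.lower text))
        = STRICTER_KEYWORDS.countP (fun kw => PySem.Chars.isIn kw.toList (PySem.Str.lower text).toList) :=
      List.countP_congr (fun kw _ => by simp [pysem])
    have hl : LENIENT_KEYWORDS.countP (fun kw => PySem.Str.isIn kw (PySem.Str.lower text))
        = LENIENT_KEYWORDS.countP (fun kw => PySem.Chars.isIn kw.toList (PySem.Str.lower text).toList) :=
      List.countP_congr (fun kw _ => by simp [pysem])
    rw [hs, hl]
    split_ifs <;> omega
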